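-- pv_equiv track=rewrite | github.com/GregoryMorse/cryptopals | utility.py | mulPolyRingPow
-- ===== SOURCE A (Python) =====
-- def posRemainder(dividend, divisor):
--   if (dividend >= 0 and dividend < divisor): return dividend
--   r = dividend % divisor
--   return r + divisor if r < 0 else r
--
-- def mulPolyRingPow(a, b, psN, gf):
--   alen, blen = len(a), len(b)
--   if (alen == 0): return a
--   if (blen == 0): return b
--   p = [0] * (alen + blen - 1)
--   for i in range(blen):
--     if (b[i] == 0): continue
--     for j in range(max(0, len(p) - psN - i - 1), alen):
--       if (a[j] == 0): continue
--       ijoffs = i + j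
--       if (b[i] == -1): p[ijoffs] += (gf - a[j])
--       elif (a[j] == -1): p[ijoffs] += (gf - b[i])
--       else: p[ijoffs] += a[j] * b[i]
--   import itertools
--   return [posRemainder(x, gf) for x in list(itertools.dropwhile(lambda c: c == 0, p))]
-- ===== SOURCE B (Python) =====
-- def mulPolyRingPow(a, b, psN, gf):
--   # per-output-coefficient direct sum (output-major) instead of A's input-major accumulation
--   if not a: return a
--   if not b: return b
--   L = len(a) + len(b) - 1
--   lo = max(0, L - psN - 1)      # positions below lo receive no contributions in the truncated product
--   p = []
--   for k in range(lo, L):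
--     s = 0
--     for j in range(max(0, k - len(b) + 1), min(k, len(a) - 1) + 1):
--       x, y = a[j], b[k - j]
--       if x != 0 and y != 0:
--         s += x * y + (gf if x == -1 or y == -1 else 0)
--     p.append(s)
--   t = 0
--   while t < len(p) and p[t] == 0:
--     t += 1
--   return [_posRem(x, gf) for x in p[t:]]
--
-- def _posRem(dividend, divisor):
--   if 0 <= dividend < divisor: return dividend
--   r = dividend % divisor
--   return r + divisor if r < 0 else r
-- ===== Notes on version B (the rewrite author's own statement) =====
-- stated objective: alternative
-- what changed: B replaces A's input-major accumulation into a pre-allocated buffer (outer loop over b, truncated inner loop over a, in-place p[i+j] updates with -1 special-case branches) by a direct output-major computation: it derives the first contributing output position lo = max(0, len(a)+len(b)-1-psN-1) and computes each coefficient from lo on as a single windowed sum, never materialising the zero prefix.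
import Mathlib
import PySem

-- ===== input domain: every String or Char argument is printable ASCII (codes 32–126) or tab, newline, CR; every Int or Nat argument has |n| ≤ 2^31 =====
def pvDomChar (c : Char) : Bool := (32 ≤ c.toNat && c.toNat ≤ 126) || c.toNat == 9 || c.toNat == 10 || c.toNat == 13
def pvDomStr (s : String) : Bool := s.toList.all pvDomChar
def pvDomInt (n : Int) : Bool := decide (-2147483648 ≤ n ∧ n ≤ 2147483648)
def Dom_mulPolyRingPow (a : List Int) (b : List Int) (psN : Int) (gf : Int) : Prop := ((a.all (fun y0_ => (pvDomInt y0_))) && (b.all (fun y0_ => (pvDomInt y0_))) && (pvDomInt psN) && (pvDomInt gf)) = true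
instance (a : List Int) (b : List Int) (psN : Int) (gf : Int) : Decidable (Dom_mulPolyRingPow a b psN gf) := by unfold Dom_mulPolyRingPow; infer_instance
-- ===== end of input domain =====

-- B computes the truncated product output-major (one windowed sum per coefficient, starting at
-- the first position the truncation allows) instead of A's input-major in-place accumulation;
-- alternative structure, no speed claim.

-- ===== PORT A =====
def posRemainder (dividend : Int) (divisor : Int) : Int :=
  if dividend ≥ 0 ∧ dividend < divisor then dividend
  else
    let r := PySem.Int.mod dividend divisor
    if r < 0 then r + divisor else r

def mulPolyRingPow (a : List Int) (b : List Int) (psN : Int) (gf : Int) : List Int :=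
  let alen : Int := PySem.List.len a
  let blen : Int := PySem.List.len b
  if alen = 0 then a
  else if blen = 0 then b
  else
    let p0 : List Int := List.replicate (alen + blen - 1).toNat 0
    let p := (PySem.List.pyRange 0 blen 1).foldl (fun p i =>
      if PySem.List.pyGetD b i 0 = 0 then p
      else (PySem.List.pyRange (max 0 (PySem.List.len p - psN - i - 1)) alen 1).foldl (fun p j =>
        if PySem.List.pyGetD a j 0 = 0 then p
        else
          let ijoffs := i + j
          if PySem.List.pyGetD b i 0 = -1 then
            PySem.List.pySetD p ijoffs (PySem.List.pyGetD p ijoffs 0 + (gf - PySem.List.pyGetD a j 0))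
          else if PySem.List.pyGetD a j 0 = -1 then
            PySem.List.pySetD p ijoffs (PySem.List.pyGetD p ijoffs 0 + (gf - PySem.List.pyGetD b i 0))
          else
            PySem.List.pySetD p ijoffs (PySem.List.pyGetD p ijoffs 0 + PySem.List.pyGetD a j 0 * PySem.List.pyGetD b i 0)) p) p0
    (p.dropWhile (fun c => c == 0)).map (fun x => posRemainder x gf)

-- ===== PORT B =====
def posRemAlt (dividend : Int) (divisor : Int) : Int :=
  if 0 ≤ dividend ∧ dividend < divisor then dividend
  else
    let r := PySem.Int.mod dividend divisor
    if r < 0 then r + divisor else r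

-- transcription of Source B's leading-zero strip loop (t advances past zeros, then p[t:])
def stripZeros : List Int → List Int
  | [] => []
  | x :: xs => if x = 0 then stripZeros xs else x :: xs

def mulPolyRingPow_alt (a : List Int) (b : List Int) (psN : Int) (gf : Int) : List Int :=
  if a = [] then a
  else if b = [] then b
  else
    let L : Int := PySem.List.len a + PySem.List.len b - 1
    let lo : Int := max 0 (L - psN - 1)
    let p := (PySem.List.pyRange lo L 1).map (fun k =>
      (PySem.List.pyRange (max 0 (k - PySem.List.len b + 1)) (min k (PySem.List.len a - 1) + 1) 1).foldl
        (fun s j =>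
          let x := PySem.List.pyGetD a j 0
          let y := PySem.List.pyGetD b (k - j) 0
          if x ≠ 0 ∧ y ≠ 0 then s + (x * y + (if x = -1 ∨ y = -1 then gf else 0)) else s) 0)
    (stripZeros p).map (fun x => posRemAlt x gf)

-- ===== PRECONDITION & SPEC =====
-- plain (untruncated-by-gf) product coefficient k of a*b, used only to state Pre_
def pvConv (a : List Int) (b : List Int) (k : Nat) : Int :=
  ((List.range a.length).map (fun (j : Nat) =>
    if (j : Int) ≤ (k : Int) ∧ (k : Int) - (j : Int) < (b.length : Int) then
      a.getD j 0 * b.getD (k - j) 0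
    else 0)).sum

-- Pre_ excludes exactly the inputs on which Python A raises ZeroDivisionError ('% 0' in
-- posRemainder): gf = 0 with both polynomials nonempty and some coefficient of the truncated
-- product nonzero; everywhere else A returns normally.
def Pre_mulPolyRingPow (a : List Int) (b : List Int) (psN : Int) (gf : Int) : Prop :=
  gf ≠ 0 ∨ a = [] ∨ b = [] ∨
    (∀ k : Nat, k < a.length + b.length - 1 →
      ((a.length : Int) + (b.length : Int) - 1 - psN - 1 ≤ (k : Int)) → pvConv a b k = 0)
instance (a : List Int) (b : List Int) (psN : Int) (gf : Int) : Decidable (Pre_mulPolyRingPow a b psN gf) := by unfold Pre_mulPolyRingPow; infer_instance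

def pvWitness_mulPolyRingPow : List Int × List Int × Int × Int := ([1, 2], [1, -1], 3, 7)

def Spec_mulPolyRingPow (a : List Int) (b : List Int) (psN : Int) (gf : Int) (out : List Int) : Prop := out = mulPolyRingPow_alt a b psN gf
instance (a : List Int) (b : List Int) (psN : Int) (gf : Int) (out : List Int) : Decidable (Spec_mulPolyRingPow a b psN gf out) := by unfold Spec_mulPolyRingPow; infer_instance

-- ===== CLAIM (what is proved, stated in full; the proofs are below) =====
def Claim_equal_mulPolyRingPow : Prop := ∀ (a : List Int) (b : List Int) (psN : Int) (gf : Int), Dom_mulPolyRingPow a b psN gf → Pre_mulPolyRingPow a b psN gf → Spec_mulPolyRingPow a b psN gf (mulPolyRingPow a b psN gf)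

-- ===== LEMMAS AND PROOFS =====

-- ===== helper definitions =====
def pvA (a : List Int) (j : Int) : Int := PySem.List.pyGetD a j 0
def pvB (b : List Int) (i : Int) : Int := PySem.List.pyGetD b i 0
def pvTv (a b : List Int) (gf i j : Int) : Int :=
  if pvB b i = -1 then gf - pvA a j
  else if pvA a j = -1 then gf - pvB b i
  else pvA a j * pvB b i
def pvG (a b : List Int) (gf k j : Int) : Int :=
  if 0 ≤ k - j ∧ k - j < PySem.List.len b ∧ pvA a j ≠ 0 ∧ pvB b (k - j) ≠ 0 then
    pvA a j * pvB b (k - j) + (if pvA a j = -1 ∨ pvB b (k - j) = -1 then gf else 0)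
  else 0
def pvC (a b : List Int) (gf k : Int) : Int :=
  ((PySem.List.pyRange 0 (PySem.List.len a) 1).map (pvG a b gf k)).sum
def pvStep (a b : List Int) (gf : Int) (p : List Int) (x : Int × Int) : List Int :=
  if pvA a x.2 = 0 then p
  else PySem.List.pySetD p (x.1 + x.2) (PySem.List.pyGetD p (x.1 + x.2) 0 + pvTv a b gf x.1 x.2)
def pvT (a b : List Int) (gf k : Int) (x : Int × Int) : Int :=
  if pvA a x.2 = 0 then 0 else if x.1 + x.2 = k then pvTv a b gf x.1 x.2 else 0
def pvInner (a b : List Int) (psN gf L : Int) (p : List Int) (i : Int) : List Int :=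
  if pvB b i = 0 then p
  else (PySem.List.pyRange (max 0 (L - psN - i - 1)) (PySem.List.len a) 1).foldl
    (fun p j => pvStep a b gf p (i, j)) p
def pvUs (a b : List Int) (psN L : Int) : List (Int × Int) :=
  (PySem.List.pyRange 0 (PySem.List.len b) 1).flatMap (fun i =>
    if pvB b i = 0 then []
    else (PySem.List.pyRange (max 0 (L - psN - i - 1)) (PySem.List.len a) 1).map (Prod.mk i))

-- ===== generic list lemmas =====
theorem stripZeros_eq_dropWhile (l : List Int) : stripZeros l = l.dropWhile (fun c => c == 0) := by
  induction l with
  | nil => rfl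
  | cons x xs ih =>
      simp only [stripZeros, ih, List.dropWhile_cons]
      split_ifs with h1 h2 h2 <;> simp_all

theorem pv_dropWhile_zero_prefix (pre rest : List Int) (h : ∀ x ∈ pre, x = 0) :
    (pre ++ rest).dropWhile (fun c => c == 0) = rest.dropWhile (fun c => c == 0) := by
  induction pre with
  | nil => rfl
  | cons x xs ih =>
      have hx : x = 0 := h x (by simp)
      simp [hx]
      exact ih (fun y hy => h y (by simp [hy]))

theorem pv_sum_swap (l1 l2 : List Int) (f : Int → Int → Int) :
    (l1.map (fun i => (l2.map (f i)).sum)).sum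
      = (l2.map (fun j => (l1.map (fun i => f i j)).sum)).sum := by
  induction l1 with
  | nil => simp
  | cons x xs ih =>
      simp only [List.map_cons, List.sum_cons, ih]
      rw [← PySem.List.sum_map_add_int]

theorem pv_sum_single (l : List Int) (hnd : l.Nodup) (c : Int) (f : Int → Int) :
    (l.map (fun i => if i = c then f i else 0)).sum = if c ∈ l then f c else 0 := by
  induction l with
  | nil => simp
  | cons x xs ih =>
      simp only [List.nodup_cons] at hnd
      simp only [List.map_cons, List.sum_cons, ih hnd.2, List.mem_cons]
      by_cases hx : x = c
      · subst hx; simp [hnd.1]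
      · simp [hx, Ne.symm hx]

theorem pv_sum_flatMap {α β : Type} (l : List α) (h : α → List β) (f : β → Int) :
    ((l.flatMap h).map f).sum = (l.map (fun x => ((h x).map f).sum)).sum := by
  induction l with
  | nil => rfl
  | cons x xs ih => simp [ih]

theorem pv_foldl_len {α : Type} (g : List Int → α → List Int)
    (h : ∀ p x, (g p x).length = p.length) :
    ∀ (l : List α) (p : List Int), (l.foldl g p).length = p.length := by
  intro l
  induction l with
  | nil => intro p; rfl
  | cons x xs ih => intro p; rw [List.foldl_cons, ih, h]

theorem pv_foldl_congr_len {α : Type} (g g' : List Int → α → List Int) (n : Nat)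
    (hlen : ∀ p x, p.length = n → (g' p x).length = n)
    (heq : ∀ p x, p.length = n → g p x = g' p x) :
    ∀ (l : List α) (p : List Int), p.length = n → l.foldl g p = l.foldl g' p := by
  intro l
  induction l with
  | nil => intro p _; rfl
  | cons x xs ih =>
      intro p hp
      rw [List.foldl_cons, List.foldl_cons, heq p x hp, ih _ (hlen p x hp)]

theorem pv_foldl_flatMap {α β : Type} (g : List Int → β → List Int) (h : α → List β) :
    ∀ (l : List α) (p : List Int),
      l.foldl (fun p i => (h i).foldl g p) p = (l.flatMap h).foldl g p := by
  intro l
  induction l with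
  | nil => intro p; rfl
  | cons x xs ih => intro p; rw [List.foldl_cons, List.flatMap_cons, List.foldl_append, ih]

-- ===== the update-fold characterisation =====
theorem pv_step_len (a b : List Int) (gf : Int) (p : List Int) (x : Int × Int) :
    (pvStep a b gf p x).length = p.length := by
  unfold pvStep
  split_ifs with h
  · rfl
  · exact PySem.List.length_pySetD ..

theorem pv_foldl_step_getD (a b : List Int) (gf : Int) :
    ∀ (us : List (Int × Int)) (p : List Int) (k : Nat), k < p.length →
      (∀ x ∈ us, 0 ≤ x.1 + x.2 ∧ x.1 + x.2 < (p.length : Int)) →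
      (us.foldl (pvStep a b gf) p).getD k 0 = p.getD k 0 + (us.map (pvT a b gf (k : Int))).sum := by
  intro us
  induction us with
  | nil => intro p k hk _; simp
  | cons x rest ih =>
      intro p k hk hus
      have hx := hus x (by simp)
      have hlen : (pvStep a b gf p x).length = p.length := pv_step_len ..
      rw [List.foldl_cons, List.map_cons, List.sum_cons,
        ih (pvStep a b gf p x) k (by omega) (by rw [hlen]; exact fun y hy => hus y (by simp [hy]))]
      have hgoal : (pvStep a b gf p x).getD k 0 = p.getD k 0 + pvT a b gf (k : Int) x := by
        unfold pvStep pvT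
        split_ifs with h0 heq
        · simp
        · have hm : (x.1 + x.2).toNat = k := by omega
          rw [PySem.List.pySetD_of_nonneg _ _ hx.1, PySem.List.pyGetD_eq_getElem _ _ hx.1 hx.2,
            List.getD_eq_getElem?_getD, List.getElem?_set]
          simp [hm, hk]
        · have hm : ¬ ((x.1 + x.2).toNat = k) := by omega
          rw [PySem.List.pySetD_of_nonneg _ _ hx.1,
            List.getD_eq_getElem?_getD, List.getElem?_set]
          simp [hm, List.getD_eq_getElem?_getD]
      rw [hgoal]; ring

-- ===== A-side structure =====
theorem pvTv_eq (a b : List Int) (gf i j : Int) :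
    pvTv a b gf i j = pvA a j * pvB b i + (if pvA a j = -1 ∨ pvB b i = -1 then gf else 0) := by
  unfold pvTv
  by_cases h1 : pvB b i = -1
  · simp [h1]; ring
  · by_cases h2 : pvA a j = -1
    · simp [h1, h2]; ring
    · simp [h1, h2]

theorem pv_port_eq (a b : List Int) (psN gf : Int) (ha : a ≠ []) (hb : b ≠ []) :
    mulPolyRingPow a b psN gf =
      ((((PySem.List.pyRange 0 (PySem.List.len b) 1).foldl
          (pvInner a b psN gf (PySem.List.len a + PySem.List.len b - 1))
          (List.replicate ((PySem.List.len a + PySem.List.len b - 1)).toNat 0)).dropWhile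
            (fun c => c == 0)).map (fun x => posRemainder x gf)) := by
  have ha1 : 0 < a.length := List.length_pos_iff.mpr ha
  have hb1 : 0 < b.length := List.length_pos_iff.mpr hb
  have h1 : ¬ (PySem.List.len a = 0) := by simp [PySem.List.len_eq]; omega
  have h2 : ¬ (PySem.List.len b = 0) := by simp [PySem.List.len_eq]; omega
  unfold mulPolyRingPow
  rw [if_neg h1, if_neg h2]
  dsimp only
  congr 2
  apply pv_foldl_congr_len _ _ ((PySem.List.len a + PySem.List.len b - 1)).toNat
  · intro p i hp
    unfold pvInner
    split_ifs with hc
    · exact hp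
    · rw [pv_foldl_len _ (fun p j => pv_step_len a b gf p (i, j))]; exact hp
  · intro p i hp
    have hlenp : PySem.List.len p = PySem.List.len a + PySem.List.len b - 1 := by
      simp [PySem.List.len_eq, hp]; omega
    unfold pvInner
    rw [hlenp]
    have hfun : (fun (p : List Int) (j : Int) =>
        if PySem.List.pyGetD a j 0 = 0 then p
        else
          let ijoffs := i + j
          if PySem.List.pyGetD b i 0 = -1 then
            PySem.List.pySetD p ijoffs (PySem.List.pyGetD p ijoffs 0 + (gf - PySem.List.pyGetD a j 0))
          else if PySem.List.pyGetD a j 0 = -1 then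
            PySem.List.pySetD p ijoffs (PySem.List.pyGetD p ijoffs 0 + (gf - PySem.List.pyGetD b i 0))
          else
            PySem.List.pySetD p ijoffs (PySem.List.pyGetD p ijoffs 0 + PySem.List.pyGetD a j 0 * PySem.List.pyGetD b i 0))
        = (fun p j => pvStep a b gf p (i, j)) := by
      funext p j
      simp only [pvStep, pvA, pvB, pvTv]
      split_ifs <;> rfl
    simp only [pvB]
    rw [hfun]
    rfl
  · simp [PySem.List.len_eq]

theorem pv_inner_flat (a b : List Int) (psN gf L : Int) (p : List Int) :
    (PySem.List.pyRange 0 (PySem.List.len b) 1).foldl (pvInner a b psN gf L) p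
      = (pvUs a b psN L).foldl (pvStep a b gf) p := by
  unfold pvUs
  rw [← pv_foldl_flatMap]
  have hfun : (fun (p : List Int) (i : Int) =>
      ((if pvB b i = 0 then []
        else (PySem.List.pyRange (max 0 (L - psN - i - 1)) (PySem.List.len a) 1).map (Prod.mk i)).foldl
          (pvStep a b gf) p)) = pvInner a b psN gf L := by
    funext p i
    unfold pvInner
    by_cases hc : pvB b i = 0
    · simp [hc]
    · rw [if_neg hc, if_neg hc, List.foldl_map]
  rw [hfun]

theorem pv_us_mem (a b : List Int) (psN L : Int) (hL : L = PySem.List.len a + PySem.List.len b - 1)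
    (x : Int × Int) (hx : x ∈ pvUs a b psN L) : 0 ≤ x.1 + x.2 ∧ x.1 + x.2 < L := by
  unfold pvUs at hx
  rw [List.mem_flatMap] at hx
  obtain ⟨i, hi, hxi⟩ := hx
  rw [PySem.List.mem_pyRange_one] at hi
  by_cases hc : pvB b i = 0
  · simp [hc] at hxi
  · rw [if_neg hc, List.mem_map] at hxi
    obtain ⟨j, hj, rfl⟩ := hxi
    rw [PySem.List.mem_pyRange_one] at hj
    simp only
    omega

theorem pv_sum_eq (a b : List Int) (psN gf L k : Int) (ha : a ≠ [])
    (hL : L = PySem.List.len a + PySem.List.len b - 1) :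
    ((pvUs a b psN L).map (pvT a b gf k)).sum
      = if L - psN - 1 ≤ k then pvC a b gf k else 0 := by
  have ha1 : (1 : Int) ≤ PySem.List.len a := by
    have := List.length_pos_iff.mpr ha
    simp [PySem.List.len_eq]; omega
  have hrow : ∀ i : Int,
      ((if pvB b i = 0 then ([] : List (Int × Int))
        else (PySem.List.pyRange (max 0 (L - psN - i - 1)) (PySem.List.len a) 1).map (Prod.mk i)).map
          (pvT a b gf k)).sum
      = ((PySem.List.pyRange 0 (PySem.List.len a) 1).map
          (fun j => if pvB b i = 0 then 0 else if L - psN - i - 1 ≤ j then pvT a b gf k (i, j) else 0)).sum := by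
    intro i
    by_cases hc : pvB b i = 0
    · simp [hc]
    · rw [if_neg hc, List.map_map]
      have h2 : ((PySem.List.pyRange 0 (PySem.List.len a) 1).map
          (fun j => if pvB b i = 0 then 0 else if L - psN - i - 1 ≤ j then pvT a b gf k (i, j) else 0))
          = ((PySem.List.pyRange 0 (PySem.List.len a) 1).map
            (fun j => if L - psN - i - 1 ≤ j then pvT a b gf k (i, j) else 0)) :=
        List.map_congr_left (fun j _ => by rw [if_neg hc])
      rw [h2]
      by_cases hs : PySem.List.len a ≤ max 0 (L - psN - i - 1)
      · rw [PySem.List.pyRange_one_eq_nil hs]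
        have h3 : ((PySem.List.pyRange 0 (PySem.List.len a) 1).map
            (fun j => if L - psN - i - 1 ≤ j then pvT a b gf k (i, j) else 0))
            = ((PySem.List.pyRange 0 (PySem.List.len a) 1).map (fun _ => (0:Int))) :=
          List.map_congr_left (fun j hj => by
            rw [PySem.List.mem_pyRange_one] at hj
            show (if L - psN - i - 1 ≤ j then pvT a b gf k (i, j) else 0) = 0
            exact if_neg (by omega))
        rw [h3]
        simp
      · rw [not_le] at hs
        rw [PySem.List.pyRange_one_append 0 (max 0 (L - psN - i - 1)) (PySem.List.len a)
          (by omega) (le_of_lt hs), List.map_append, List.sum_append]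
        have hpre : ((PySem.List.pyRange 0 (max 0 (L - psN - i - 1)) 1).map
            (fun j => if L - psN - i - 1 ≤ j then pvT a b gf k (i, j) else 0))
            = ((PySem.List.pyRange 0 (max 0 (L - psN - i - 1)) 1).map (fun _ => (0:Int))) :=
          List.map_congr_left (fun j hj => by
            rw [PySem.List.mem_pyRange_one] at hj
            show (if L - psN - i - 1 ≤ j then pvT a b gf k (i, j) else 0) = 0
            exact if_neg (by omega))
        rw [hpre]
        have hsuf : ((PySem.List.pyRange (max 0 (L - psN - i - 1)) (PySem.List.len a) 1).map
            (fun j => if L - psN - i - 1 ≤ j then pvT a b gf k (i, j) else 0))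
            = ((PySem.List.pyRange (max 0 (L - psN - i - 1)) (PySem.List.len a) 1).map
              (fun j => pvT a b gf k (i, j))) :=
          List.map_congr_left (fun j hj => by
            rw [PySem.List.mem_pyRange_one] at hj
            show (if L - psN - i - 1 ≤ j then pvT a b gf k (i, j) else 0) = pvT a b gf k (i, j)
            exact if_pos (by omega))
        rw [hsuf]
        have hz : ((PySem.List.pyRange 0 (max 0 (L - psN - i - 1)) 1).map (fun _ => (0:Int))).sum = 0 := by
          simp
        rw [hz, zero_add]
        exact congrArg List.sum (List.map_congr_left
          (f := pvT a b gf k ∘ Prod.mk i) (g := fun j => pvT a b gf k (i, j)) (fun j _ => rfl))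
  unfold pvUs
  rw [pv_sum_flatMap, List.map_congr_left (fun i (_ : i ∈ PySem.List.pyRange 0 (PySem.List.len b) 1) => hrow i),
    pv_sum_swap]
  have hcol : ∀ j : Int, (0 ≤ j ∧ j < PySem.List.len a) →
      ((PySem.List.pyRange 0 (PySem.List.len b) 1).map
        (fun i => if pvB b i = 0 then 0 else if L - psN - i - 1 ≤ j then pvT a b gf k (i, j) else 0)).sum
      = (if L - psN - 1 ≤ k then pvG a b gf k j else 0) := by
    intro j hj
    have hpt : ((PySem.List.pyRange 0 (PySem.List.len b) 1).map
        (fun i => if pvB b i = 0 then 0 else if L - psN - i - 1 ≤ j then pvT a b gf k (i, j) else 0))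
        = ((PySem.List.pyRange 0 (PySem.List.len b) 1).map
          (fun i => if i = k - j then
            (if L - psN - 1 ≤ k ∧ pvB b (k - j) ≠ 0 ∧ pvA a j ≠ 0 then pvTv a b gf (k - j) j else 0)
          else 0)) := by
      apply List.map_congr_left
      intro i _
      by_cases hij : i = k - j
      · rw [if_pos hij]
        subst hij
        unfold pvT
        by_cases c1 : pvB b (k - j) = 0
        · simp [c1]
        · by_cases c2 : pvA a j = 0
          · simp [c1, c2]
          · by_cases c3 : L - psN - 1 ≤ k
            · rw [if_neg c1, if_pos (by omega : L - psN - (k - j) - 1 ≤ j), if_neg c2,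
                if_pos (by omega : k - j + j = k), if_pos ⟨c3, c1, c2⟩]
            · rw [if_neg c1, if_neg (by omega : ¬ (L - psN - (k - j) - 1 ≤ j)),
                if_neg (by tauto : ¬ (L - psN - 1 ≤ k ∧ pvB b (k - j) ≠ 0 ∧ pvA a j ≠ 0))]
      · rw [if_neg hij]
        unfold pvT
        split_ifs <;> first | rfl | omega
    rw [hpt, pv_sum_single _ (PySem.List.nodup_pyRange_one _ _)]
    simp only [PySem.List.mem_pyRange_one]
    unfold pvG
    rw [pvTv_eq]
    split_ifs <;> first | rfl | omega
  rw [List.map_congr_left (fun j hj => hcol j (by rwa [PySem.List.mem_pyRange_one] at hj))]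
  by_cases hck : L - psN - 1 ≤ k
  · simp only [hck, if_true]
    rfl
  · simp [hck]

theorem pv_buf_eq (a b : List Int) (psN gf : Int) (ha : a ≠ []) (hb : b ≠ []) :
    (pvUs a b psN (PySem.List.len a + PySem.List.len b - 1)).foldl (pvStep a b gf)
      (List.replicate ((PySem.List.len a + PySem.List.len b - 1)).toNat 0)
    = (PySem.List.pyRange 0 (PySem.List.len a + PySem.List.len b - 1) 1).map
        (fun k => if (PySem.List.len a + PySem.List.len b - 1) - psN - 1 ≤ k then pvC a b gf k else 0) := by
  have ha1 : 0 < a.length := List.length_pos_iff.mpr ha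
  have hb1 : 0 < b.length := List.length_pos_iff.mpr hb
  have hL1 : (1 : Int) ≤ PySem.List.len a + PySem.List.len b - 1 := by
    simp [PySem.List.len_eq]; omega
  have hlen1 : ((pvUs a b psN (PySem.List.len a + PySem.List.len b - 1)).foldl (pvStep a b gf)
      (List.replicate ((PySem.List.len a + PySem.List.len b - 1)).toNat 0)).length
      = ((PySem.List.len a + PySem.List.len b - 1)).toNat := by
    rw [pv_foldl_len _ (pv_step_len a b gf), List.length_replicate]
  apply List.ext_getElem
  · rw [hlen1, List.length_map, PySem.List.length_pyRange_one]
    congr 1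
    omega
  · intro k h1 h2
    rw [hlen1] at h1
    rw [← List.getD_eq_getElem _ 0, pv_foldl_step_getD a b gf _ _ k
      (by rw [List.length_replicate]; exact h1)
      (by
        intro x hx
        have := pv_us_mem a b psN _ rfl x hx
        rw [List.length_replicate]
        omega)]
    rw [pv_sum_eq a b psN gf _ (k : Int) ha rfl]
    have hp0 : (List.replicate ((PySem.List.len a + PySem.List.len b - 1)).toNat (0:Int)).getD k 0 = 0 := by
      rw [List.getD_eq_getElem?_getD, List.getElem?_replicate]
      have : k < ((PySem.List.len a + PySem.List.len b - 1)).toNat := h1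
      simp only [PySem.List.len_eq] at this ⊢
      rw [if_pos (by omega)]
      rfl
    rw [hp0, zero_add]
    rw [List.getElem_map, PySem.List.getElem_pyRange_one]
    simp

theorem pv_bw_eq (a b : List Int) (gf k : Int) (ha : a ≠ []) (hb : b ≠ [])
    (hk0 : 0 ≤ k) (hkL : k < PySem.List.len a + PySem.List.len b - 1) :
    ((PySem.List.pyRange (max 0 (k - PySem.List.len b + 1)) (min k (PySem.List.len a - 1) + 1) 1).foldl
      (fun s j =>
        let x := PySem.List.pyGetD a j 0
        let y := PySem.List.pyGetD b (k - j) 0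
        if x ≠ 0 ∧ y ≠ 0 then s + (x * y + (if x = -1 ∨ y = -1 then gf else 0)) else s) 0)
    = pvC a b gf k := by
  have ha1 : (1:Int) ≤ PySem.List.len a := by
    have := List.length_pos_iff.mpr ha; simp [PySem.List.len_eq]; omega
  have hb1 : (1:Int) ≤ PySem.List.len b := by
    have := List.length_pos_iff.mpr hb; simp [PySem.List.len_eq]; omega
  have hfun : (fun (s j : Int) =>
      let x := PySem.List.pyGetD a j 0
      let y := PySem.List.pyGetD b (k - j) 0
      if x ≠ 0 ∧ y ≠ 0 then s + (x * y + (if x = -1 ∨ y = -1 then gf else 0)) else s)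
      = (fun s j => s + (if pvA a j ≠ 0 ∧ pvB b (k - j) ≠ 0 then
          pvA a j * pvB b (k - j) + (if pvA a j = -1 ∨ pvB b (k - j) = -1 then gf else 0) else 0)) := by
    funext s j
    simp only [pvA, pvB]
    split_ifs <;> first | rfl | exact (add_zero s).symm
  rw [hfun, PySem.List.foldl_add, zero_add]
  -- split the full range of pvC
  unfold pvC
  rw [PySem.List.pyRange_one_append 0 (max 0 (k - PySem.List.len b + 1)) (PySem.List.len a)
    (by omega) (by omega),
    PySem.List.pyRange_one_append (max 0 (k - PySem.List.len b + 1)) (min k (PySem.List.len a - 1) + 1)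
      (PySem.List.len a) (by omega) (by omega),
    List.map_append, List.map_append, List.sum_append, List.sum_append]
  have hz1 : ((PySem.List.pyRange 0 (max 0 (k - PySem.List.len b + 1)) 1).map (pvG a b gf k)).sum = 0 := by
    rw [List.map_congr_left (g := fun _ => (0:Int)) (fun j hj => by
      rw [PySem.List.mem_pyRange_one] at hj
      show pvG a b gf k j = 0
      unfold pvG
      exact if_neg (by omega))]
    simp
  have hz2 : ((PySem.List.pyRange (min k (PySem.List.len a - 1) + 1) (PySem.List.len a) 1).map
      (pvG a b gf k)).sum = 0 := by
    rw [List.map_congr_left (g := fun _ => (0:Int)) (fun j hj => by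
      rw [PySem.List.mem_pyRange_one] at hj
      show pvG a b gf k j = 0
      unfold pvG
      exact if_neg (by omega))]
    simp
  rw [hz1, hz2, zero_add, add_zero]
  apply congrArg List.sum
  apply List.map_congr_left
  intro j hj
  rw [PySem.List.mem_pyRange_one] at hj
  unfold pvG
  split_ifs with c1 c2 c2 <;> first | rfl | omega

theorem pv_main (a b : List Int) (psN gf : Int) :
    mulPolyRingPow a b psN gf = mulPolyRingPow_alt a b psN gf := by
  by_cases ha : a = []
  · subst ha
    simp [mulPolyRingPow, mulPolyRingPow_alt, PySem.List.len_eq]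
  · by_cases hb : b = []
    · subst hb
      simp [mulPolyRingPow, mulPolyRingPow_alt, PySem.List.len_eq, ha]
    · have ha1 : (1:Int) ≤ PySem.List.len a := by
        have := List.length_pos_iff.mpr ha; simp [PySem.List.len_eq]; omega
      have hb1 : (1:Int) ≤ PySem.List.len b := by
        have := List.length_pos_iff.mpr hb; simp [PySem.List.len_eq]; omega
      rw [pv_port_eq a b psN gf ha hb, pv_inner_flat, pv_buf_eq a b psN gf ha hb]
      unfold mulPolyRingPow_alt
      rw [if_neg ha, if_neg hb]
      dsimp only
      rw [stripZeros_eq_dropWhile]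
      have hpr : (fun x => posRemAlt x gf) = (fun x => posRemainder x gf) := by
        funext x
        unfold posRemAlt posRemainder
        rfl
      rw [hpr]
      apply congrArg (List.map (fun x => posRemainder x gf))
      -- prefix of zeros then identical tails
      rw [PySem.List.pyRange_one_append 0
        (min (max 0 (PySem.List.len a + PySem.List.len b - 1 - psN - 1)) (PySem.List.len a + PySem.List.len b - 1))
        (PySem.List.len a + PySem.List.len b - 1) (by omega) (by omega), List.map_append]
      rw [pv_dropWhile_zero_prefix _ _ (by
        intro x hx
        rw [List.mem_map] at hx
        obtain ⟨kk, hk, rfl⟩ := hx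
        rw [PySem.List.mem_pyRange_one] at hk
        exact if_neg (by omega))]
      apply congrArg (List.dropWhile (fun c => c == 0))
      by_cases hcase : max 0 (PySem.List.len a + PySem.List.len b - 1 - psN - 1) ≤ PySem.List.len a + PySem.List.len b - 1
      · rw [min_eq_left hcase]
        apply List.map_congr_left
        intro kk hk
        rw [PySem.List.mem_pyRange_one] at hk
        rw [if_pos (by omega)]
        exact (pv_bw_eq a b gf kk ha hb (by omega) (by omega)).symm
      · rw [min_eq_right (by omega), PySem.List.pyRange_one_eq_nil (by omega),
          PySem.List.pyRange_one_eq_nil (by omega)]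
        simp

-- ===== VERDICT (by name: the statement is the Claim_ definition above) =====
theorem mulPolyRingPow_spec : Claim_equal_mulPolyRingPow := by
  intro a b psN gf _ _
  unfold Spec_mulPolyRingPow
  exact pv_main a b psN gf
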